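-- pv_equiv track=rewrite | github.com/siamak-p/persona_detection_agent | tone_and_personality_traits_detection/tone_detection_agent.py | _balance_speakers
-- ===== SOURCE A (Python) =====
-- from typing import List, Dict, Any, Optional, Tuple
--
-- def _balance_speakers(
--
--     messages: List[Dict[str, str]],
-- ) -> Dict[str, List[Dict[str, str]]]:
--     by_speaker: Dict[str, List[Dict[str, str]]] = {}
--     for msg in messages:
--         speaker = msg.get("speaker", "unknown")
--         if speaker not in by_speaker:
--             by_speaker[speaker] = []
--         by_speaker[speaker].append(msg)
--     return by_speaker
-- ===== SOURCE B (Python) =====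
-- def _balance_speakers(messages):
--     key = lambda m: m.get("speaker", "unknown")
--     order = list(dict.fromkeys(key(m) for m in messages))
--     return {s: [m for m in messages if key(m) == s] for s in order}
-- ===== Notes on version B (the rewrite author's own statement) =====
-- stated objective: alternative
-- what changed: Instead of one pass inserting each message into a dict entry, B first dedups the speaker keys in first-occurrence order and then builds the whole dict in a comprehension, collecting each speaker's messages with a filter pass per speaker.
import Mathlib
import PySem

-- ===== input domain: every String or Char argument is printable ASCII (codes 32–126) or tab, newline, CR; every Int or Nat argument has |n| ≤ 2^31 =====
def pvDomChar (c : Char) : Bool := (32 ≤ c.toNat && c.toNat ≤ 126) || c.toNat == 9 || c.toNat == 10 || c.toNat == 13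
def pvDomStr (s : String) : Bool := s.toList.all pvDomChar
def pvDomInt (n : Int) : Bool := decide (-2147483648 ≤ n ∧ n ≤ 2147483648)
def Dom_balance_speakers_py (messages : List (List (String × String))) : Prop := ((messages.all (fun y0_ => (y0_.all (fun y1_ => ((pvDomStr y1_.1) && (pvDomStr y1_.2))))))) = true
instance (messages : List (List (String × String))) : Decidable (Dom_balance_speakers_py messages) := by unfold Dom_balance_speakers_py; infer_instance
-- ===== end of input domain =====

-- B replaces A's single-pass dict insertion by dedup-the-speakers-then-one-filter-per-speaker
-- (a genuinely different traversal of the same cost class; not claimed faster).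

-- shared key helper: msg.get("speaker", "unknown") (the same call appears in A and in B)
def pvKey (m : List (String × String)) : String :=
  (PySem.Dict.mk m).getD "speaker" "unknown"

-- ===== PORT A =====
-- one loop iteration of A's for-loop body
def pvStep (by_speaker : PySem.Dict String (List (List (String × String))))
    (msg : List (String × String)) : PySem.Dict String (List (List (String × String))) :=
  let speaker := pvKey msg
  let by_speaker := if by_speaker.contains speaker then by_speaker else by_speaker.insert speaker []
  -- by_speaker[speaker].append(msg): read the entry, append msg, store it back
  by_speaker.modify speaker [] (fun v => v ++ [msg])

def balance_speakers_py (messages : List (List (String × String))) : List (String × List (List (String × String))) :=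
  (messages.foldl pvStep PySem.Dict.empty).items

-- ===== PORT B =====
def balance_speakers_py_alt (messages : List (List (String × String))) : List (String × List (List (String × String))) :=
  let order := PySem.List.dedup (messages.map pvKey)
  order.map (fun s => (s, messages.filter (fun m => pvKey m == s)))

-- ===== PRECONDITION & SPEC =====
def Spec_balance_speakers_py (messages : List (List (String × String))) (out : List (String × List (List (String × String)))) : Prop := out = balance_speakers_py_alt messages
instance (messages : List (List (String × String))) (out : List (String × List (List (String × String)))) : Decidable (Spec_balance_speakers_py messages out) := by unfold Spec_balance_speakers_py; infer_instance

-- ===== CLAIM (what is proved, stated in full; the proofs are below) =====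
def Claim_equal_balance_speakers_py : Prop := ∀ (messages : List (List (String × String))), Dom_balance_speakers_py messages → Spec_balance_speakers_py messages (balance_speakers_py messages)

-- ===== LEMMAS AND PROOFS =====

-- first find on such a list returns the entry of s whenever s occurs
lemma pv_find_map_key {α : Type} (ks : List String) (h : String → α) (s : String)
    (hs : s ∈ ks) :
    (ks.map (fun k => (k, h k))).find? (fun p => p.1 == s) = some (s, h s) := by
  induction ks with
  | nil => cases hs
  | cons k ks ih =>
      by_cases hk : k = s
      · subst hk; simp
      · have : s ∈ ks := by
          cases hs with
          | head => exact absurd rfl hk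
          | tail _ h' => exact h'
        simp [hk, ih this]

-- the loop invariant: after folding msgs, the dict's item list is exactly B's answer for msgs
lemma pv_inv (msgs : List (List (String × String))) :
    msgs.foldl pvStep PySem.Dict.empty =
      PySem.Dict.mk ((PySem.List.dedup (msgs.map pvKey)).map
        (fun s => (s, msgs.filter (fun m => pvKey m == s)))) := by
  induction msgs using List.reverseRecOn with
  | nil => rfl
  | append_singleton msgs m ih =>

      rw [List.foldl_append, List.foldl_cons, List.foldl_nil, ih]
      unfold pvStep
      by_cases hmem : pvKey m ∈ PySem.List.dedup (msgs.map pvKey)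
      · have hcont : ((List.map (fun k => (k, msgs.filter (fun x => pvKey x == k))) (PySem.List.dedup (msgs.map pvKey))).any (fun p => p.1 == pvKey m)) = true := by
          simp only [List.any_map, List.any_eq_true, Function.comp, beq_iff_eq]
          exact ⟨pvKey m, hmem, rfl⟩
        have hded : PySem.List.dedup ((msgs ++ [m]).map pvKey) = PySem.List.dedup (msgs.map pvKey) := by
          simp [PySem.List.dedup, PySem.Set.ofList, List.foldl_append, PySem.Set.add,
            PySem.Set.contains]
          simpa [PySem.List.dedup, PySem.Set.ofList, PySem.Set.empty] using hmem
        have hfind := pv_find_map_key (PySem.List.dedup (msgs.map pvKey))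
          (fun k => msgs.filter (fun x => pvKey x == k)) (pvKey m) hmem
        rw [hded]
        simp only [PySem.Dict.contains, PySem.Dict.modify, PySem.Dict.getD, PySem.Dict.get?,
          PySem.Dict.insert, hcont, if_true, hfind, Option.map_some, Option.getD_some]
        apply congrArg
        rw [List.map_map]
        apply List.map_congr_left
        intro k hk
        by_cases hks : k = pvKey m
        · subst hks
          simp [List.filter_append]
        · simp [Function.comp, List.filter_append, hks, Ne.symm hks, beq_iff_eq]

      · have hnotkey : ∀ x ∈ msgs, ¬ (pvKey x = pvKey m) := by
          intro x hx hkx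
          exact hmem (by
            simp [PySem.List.dedup, PySem.Set.mem_ofList]
            exact ⟨x, hx, hkx⟩)
        have hcont : ((List.map (fun k => (k, msgs.filter (fun x => pvKey x == k))) (PySem.List.dedup (msgs.map pvKey))).any (fun p => p.1 == pvKey m)) = false := by
          simp only [List.any_map, List.any_eq_false, Function.comp, beq_iff_eq]
          intro k hk hkm
          subst hkm
          exact hmem hk
        have hded : PySem.List.dedup ((msgs ++ [m]).map pvKey) = PySem.List.dedup (msgs.map pvKey) ++ [pvKey m] := by
          simp [PySem.List.dedup, PySem.Set.ofList, List.foldl_append, PySem.Set.add,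
            PySem.Set.contains]
          intro h
          exact absurd (by simpa [PySem.List.dedup, PySem.Set.ofList, PySem.Set.empty] using h) hmem
        have hfindnone : (List.map (fun k => (k, msgs.filter (fun x => pvKey x == k))) (PySem.List.dedup (msgs.map pvKey))).find? (fun p => p.1 == pvKey m) = none := by
          apply List.find?_eq_none.mpr
          intro p hp
          simp only [List.mem_map] at hp
          obtain ⟨k, hk, rfl⟩ := hp
          simp only [Bool.not_eq_true, beq_eq_false_iff_ne, ne_eq]
          intro hkm
          subst hkm
          exact hmem hk
        rw [hded]
        simp only [PySem.Dict.contains, PySem.Dict.modify, PySem.Dict.getD, PySem.Dict.get?,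
          PySem.Dict.insert, hcont, if_false, Bool.false_eq_true]
        simp only [List.map_append, List.map_map]
        have hfind2 : List.find? (fun s => s == pvKey m) (PySem.Set.ofList (List.map pvKey msgs)) = none := by
          apply List.find?_eq_none.mpr
          intro k hk
          simp only [Bool.not_eq_true, beq_eq_false_iff_ne, ne_eq]
          intro hkm
          subst hkm
          exact hmem (by simpa [PySem.List.dedup] using hk)
        simp [List.filter_append, Function.comp]
        constructor
        · intro a ha
          rw [if_neg (hnotkey a ha)]
          have hne : (pvKey m == pvKey a) = false := by
            simp only [beq_eq_false_iff_ne, ne_eq]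
            exact fun h => hnotkey a ha h.symm
          simp [List.filter, hne]
        · simp only [Function.comp_def, hfind2, Option.map_none, Option.getD_none]
          symm
          apply List.filter_eq_nil_iff.mpr
          intro x hx
          simp only [Bool.not_eq_true, beq_eq_false_iff_ne, ne_eq]
          exact hnotkey x hx



-- ===== VERDICT (by name: the statement is the Claim_ definition above) =====
theorem balance_speakers_py_spec : Claim_equal_balance_speakers_py := by
  intro messages _
  unfold Spec_balance_speakers_py balance_speakers_py balance_speakers_py_alt
  rw [pv_inv]
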